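-- pv_equiv track=rewrite | github.com/kinzay08/SkillBridge | model.py | match_best_role
-- ===== SOURCE A (Python) =====
-- ROLE_SKILLS = {
--     "Java Backend Developer": [
--         "Java", "Spring Boot", "REST API", "Hibernate", "JPA",
--         "MySQL", "PostgreSQL", "Docker", "Maven"
--     ],
--     "Node.js Backend Developer": [
--         "JavaScript", "Node.js", "Express.js", "REST API", "MongoDB",
--         "JWT Authentication", "Docker", "Redis"
--     ],
--     "Full Stack Developer (Java)": [
--         "HTML", "CSS", "JavaScript", "React", "Java",
--         "Spring Boot", "REST API", "MySQL", "Docker"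
--     ],
--     "Full Stack Developer (JS)": [
--         "HTML", "CSS", "JavaScript", "React", "Node.js",
--         "Express.js", "MongoDB", "Docker"
--     ],
--     "Frontend Developer": [
--         "HTML", "CSS", "JavaScript", "React", "Vue.js",
--         "Tailwind CSS", "Responsive Design"
--     ],
--     "Mobile Developer": [
--         "Flutter", "Dart", "React Native", "Kotlin", "Swift",
--         "Firebase", "UI/UX"
--     ],
--     "Data Scientist": [
--         "Python", "Pandas", "NumPy", "Scikit-learn",
--         "Matplotlib", "TensorFlow", "SQL"
--     ],
--     "AI Engineer": [
--         "Python", "TensorFlow", "PyTorch", "Deep Learning",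
--         "NLP", "ML Models", "MLOps"
--     ],
--     "Blockchain Developer": [
--         "Solidity", "Ethereum", "Smart Contracts",
--         "Web3.js", "Cryptography"
--     ],
--     "Cloud Engineer": [
--         "AWS", "Azure", "GCP", "Docker", "Kubernetes",
--         "Terraform", "CI/CD"
--     ],
--     "DevOps Engineer": [
--         "Docker", "Kubernetes", "CI/CD", "Linux",
--         "AWS", "Monitoring", "GitHub Actions"
--     ],
--     "UI/UX Designer": [
--         "Figma", "Adobe XD", "Sketch", "Wireframing",
--         "Prototyping", "User Research", "Information Architecture",
--         "Usability Testing", "Accessibility", "Design Systems",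
--         "HTML", "CSS", "Basic JavaScript"
--     ],
--     "Web Developer": [
--         "HTML", "CSS", "JavaScript", "Responsive Design", "Basic SEO",
--         "Version Control (Git)", "Basic Backend (PHP/Node.js/Python)"
--     ],
--     "Backend Developer": [
--         "REST API", "Databases (SQL & NoSQL)", "Authentication",
--         "Docker", "Server-side Framework (Spring/Express/Django)"
--     ],
--     "Database Administrator": [
--         "SQL", "MySQL", "PostgreSQL", "Database Backup",
--         "Performance Tuning", "Stored Procedures", "Security"
--     ],
--     "Machine Learning Engineer": [
--         "Python", "Scikit-learn", "TensorFlow", "PyTorch",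
--         "Model Optimization", "Data Preprocessing", "ML Pipelines"
--     ],
--     "System Administrator": [
--         "Linux", "Shell Scripting", "Networking Basics",
--         "System Monitoring", "Backup & Recovery", "Firewall Config"
--     ],
--     "Embedded Systems Engineer": [
--         "C/C++", "Microcontrollers (Arduino, STM32)",
--         "RTOS", "IoT Protocols", "Low-level Hardware Debugging"
--     ],
--     "AR/VR Developer": [
--         "Unity", "C#", "Unreal Engine", "3D Modeling",
--         "ARKit/ARCore", "OpenXR", "Interaction Design"
--     ],
--     "Cybersecurity Specialist": [
--         "Network Security", "Penetration Testing", "SIEM",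
--         "Firewalls", "Cryptography", "Incident Response"
--     ],
--     "Network Engineer": [
--         "Routing & Switching", "TCP/IP", "LAN/WAN",
--         "Cisco Devices", "Firewall Management", "Network Monitoring"
--     ]
-- }
--
-- def match_best_role(user_skills):
--     best_role = None
--     max_matches = 0
--     for role, skills in ROLE_SKILLS.items():
--         matches = len(set(map(str.lower, user_skills)) & set(map(str.lower, skills)))
--         if matches > max_matches:
--             max_matches = matches
--             best_role = role
--     return best_role
-- ===== SOURCE B (Python) =====
-- ROLES = [
--     'Java Backend Developer',
--     'Node.js Backend Developer',
--     'Full Stack Developer (Java)',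
--     'Full Stack Developer (JS)',
--     'Frontend Developer',
--     'Mobile Developer',
--     'Data Scientist',
--     'AI Engineer',
--     'Blockchain Developer',
--     'Cloud Engineer',
--     'DevOps Engineer',
--     'UI/UX Designer',
--     'Web Developer',
--     'Backend Developer',
--     'Database Administrator',
--     'Machine Learning Engineer',
--     'System Administrator',
--     'Embedded Systems Engineer',
--     'AR/VR Developer',
--     'Cybersecurity Specialist',
--     'Network Engineer',
-- ]
--
-- SKILL_ROLES = {
--     'java': ['Java Backend Developer', 'Full Stack Developer (Java)'],
--     'spring boot': ['Java Backend Developer', 'Full Stack Developer (Java)'],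
--     'rest api': ['Java Backend Developer', 'Node.js Backend Developer', 'Full Stack Developer (Java)', 'Backend Developer'],
--     'hibernate': ['Java Backend Developer'],
--     'jpa': ['Java Backend Developer'],
--     'mysql': ['Java Backend Developer', 'Full Stack Developer (Java)', 'Database Administrator'],
--     'postgresql': ['Java Backend Developer', 'Database Administrator'],
--     'docker': ['Java Backend Developer', 'Node.js Backend Developer', 'Full Stack Developer (Java)', 'Full Stack Developer (JS)', 'Cloud Engineer', 'DevOps Engineer', 'Backend Developer'],
--     'maven': ['Java Backend Developer'],
--     'javascript': ['Node.js Backend Developer', 'Full Stack Developer (Java)', 'Full Stack Developer (JS)', 'Frontend Developer', 'Web Developer'],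
--     'node.js': ['Node.js Backend Developer', 'Full Stack Developer (JS)'],
--     'express.js': ['Node.js Backend Developer', 'Full Stack Developer (JS)'],
--     'mongodb': ['Node.js Backend Developer', 'Full Stack Developer (JS)'],
--     'jwt authentication': ['Node.js Backend Developer'],
--     'redis': ['Node.js Backend Developer'],
--     'html': ['Full Stack Developer (Java)', 'Full Stack Developer (JS)', 'Frontend Developer', 'UI/UX Designer', 'Web Developer'],
--     'css': ['Full Stack Developer (Java)', 'Full Stack Developer (JS)', 'Frontend Developer', 'UI/UX Designer', 'Web Developer'],
--     'react': ['Full Stack Developer (Java)', 'Full Stack Developer (JS)', 'Frontend Developer'],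
--     'vue.js': ['Frontend Developer'],
--     'tailwind css': ['Frontend Developer'],
--     'responsive design': ['Frontend Developer', 'Web Developer'],
--     'flutter': ['Mobile Developer'],
--     'dart': ['Mobile Developer'],
--     'react native': ['Mobile Developer'],
--     'kotlin': ['Mobile Developer'],
--     'swift': ['Mobile Developer'],
--     'firebase': ['Mobile Developer'],
--     'ui/ux': ['Mobile Developer'],
--     'python': ['Data Scientist', 'AI Engineer', 'Machine Learning Engineer'],
--     'pandas': ['Data Scientist'],
--     'numpy': ['Data Scientist'],
--     'scikit-learn': ['Data Scientist', 'Machine Learning Engineer'],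
--     'matplotlib': ['Data Scientist'],
--     'tensorflow': ['Data Scientist', 'AI Engineer', 'Machine Learning Engineer'],
--     'sql': ['Data Scientist', 'Database Administrator'],
--     'pytorch': ['AI Engineer', 'Machine Learning Engineer'],
--     'deep learning': ['AI Engineer'],
--     'nlp': ['AI Engineer'],
--     'ml models': ['AI Engineer'],
--     'mlops': ['AI Engineer'],
--     'solidity': ['Blockchain Developer'],
--     'ethereum': ['Blockchain Developer'],
--     'smart contracts': ['Blockchain Developer'],
--     'web3.js': ['Blockchain Developer'],
--     'cryptography': ['Blockchain Developer', 'Cybersecurity Specialist'],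
--     'aws': ['Cloud Engineer', 'DevOps Engineer'],
--     'azure': ['Cloud Engineer'],
--     'gcp': ['Cloud Engineer'],
--     'kubernetes': ['Cloud Engineer', 'DevOps Engineer'],
--     'terraform': ['Cloud Engineer'],
--     'ci/cd': ['Cloud Engineer', 'DevOps Engineer'],
--     'linux': ['DevOps Engineer', 'System Administrator'],
--     'monitoring': ['DevOps Engineer'],
--     'github actions': ['DevOps Engineer'],
--     'figma': ['UI/UX Designer'],
--     'adobe xd': ['UI/UX Designer'],
--     'sketch': ['UI/UX Designer'],
--     'wireframing': ['UI/UX Designer'],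
--     'prototyping': ['UI/UX Designer'],
--     'user research': ['UI/UX Designer'],
--     'information architecture': ['UI/UX Designer'],
--     'usability testing': ['UI/UX Designer'],
--     'accessibility': ['UI/UX Designer'],
--     'design systems': ['UI/UX Designer'],
--     'basic javascript': ['UI/UX Designer'],
--     'basic seo': ['Web Developer'],
--     'version control (git)': ['Web Developer'],
--     'basic backend (php/node.js/python)': ['Web Developer'],
--     'databases (sql & nosql)': ['Backend Developer'],
--     'authentication': ['Backend Developer'],
--     'server-side framework (spring/express/django)': ['Backend Developer'],
--     'database backup': ['Database Administrator'],
--     'performance tuning': ['Database Administrator'],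
--     'stored procedures': ['Database Administrator'],
--     'security': ['Database Administrator'],
--     'model optimization': ['Machine Learning Engineer'],
--     'data preprocessing': ['Machine Learning Engineer'],
--     'ml pipelines': ['Machine Learning Engineer'],
--     'shell scripting': ['System Administrator'],
--     'networking basics': ['System Administrator'],
--     'system monitoring': ['System Administrator'],
--     'backup & recovery': ['System Administrator'],
--     'firewall config': ['System Administrator'],
--     'c/c++': ['Embedded Systems Engineer'],
--     'microcontrollers (arduino, stm32)': ['Embedded Systems Engineer'],
--     'rtos': ['Embedded Systems Engineer'],
--     'iot protocols': ['Embedded Systems Engineer'],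
--     'low-level hardware debugging': ['Embedded Systems Engineer'],
--     'unity': ['AR/VR Developer'],
--     'c#': ['AR/VR Developer'],
--     'unreal engine': ['AR/VR Developer'],
--     '3d modeling': ['AR/VR Developer'],
--     'arkit/arcore': ['AR/VR Developer'],
--     'openxr': ['AR/VR Developer'],
--     'interaction design': ['AR/VR Developer'],
--     'network security': ['Cybersecurity Specialist'],
--     'penetration testing': ['Cybersecurity Specialist'],
--     'siem': ['Cybersecurity Specialist'],
--     'firewalls': ['Cybersecurity Specialist'],
--     'incident response': ['Cybersecurity Specialist'],
--     'routing & switching': ['Network Engineer'],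
--     'tcp/ip': ['Network Engineer'],
--     'lan/wan': ['Network Engineer'],
--     'cisco devices': ['Network Engineer'],
--     'firewall management': ['Network Engineer'],
--     'network monitoring': ['Network Engineer'],
-- }
--
-- # B: the skill->roles mapping is the inverted index of the original ROLE_SKILLS table,
-- # precomputed once at authoring time (ROLES keeps the original role order).  Matching
-- # tallies per-role counts by looking up each distinct lowercased user skill, then takes
-- # the maximum count and returns the first role attaining it (None if the maximum is 0).
--
-- def match_best_role(user_skills):
--     counts = {}
--     for s in {u.lower() for u in user_skills}:
--         for role in SKILL_ROLES.get(s, []):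
--             counts[role] = counts.get(role, 0) + 1
--     best = max((counts.get(r, 0) for r in ROLES), default=0)
--     if best == 0:
--         return None
--     for role in ROLES:
--         if counts.get(role, 0) == best:
--             return role
-- ===== Notes on version B (the rewrite author's own statement) =====
-- stated objective: faster
-- what changed: B looks skills up in a precomputed inverted index (lowercased skill -> roles) and tallies per-role counts in one pass over the distinct user skills, then returns the first role attaining the maximum count (max-then-find), instead of rebuilding the lowercased user-skill set and intersecting it with each role's skill set for every role and tracking a strict-improvement argmax.
import Mathlib
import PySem

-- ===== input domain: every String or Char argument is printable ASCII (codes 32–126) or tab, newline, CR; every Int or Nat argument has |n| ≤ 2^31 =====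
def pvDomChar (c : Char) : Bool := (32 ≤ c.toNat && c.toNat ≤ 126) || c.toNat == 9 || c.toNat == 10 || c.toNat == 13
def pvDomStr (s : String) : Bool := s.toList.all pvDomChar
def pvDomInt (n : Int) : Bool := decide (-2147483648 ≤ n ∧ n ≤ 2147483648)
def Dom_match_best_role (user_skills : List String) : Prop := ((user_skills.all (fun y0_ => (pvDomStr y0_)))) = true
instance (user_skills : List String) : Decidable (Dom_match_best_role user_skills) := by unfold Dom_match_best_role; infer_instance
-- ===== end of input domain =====

-- B replaces A's per-role set intersections with a precomputed inverted index
-- (lowercased skill -> roles), a single tally pass over the distinct user skills,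
-- and a max-then-first-attaining selection; a different algorithm of similar cost
-- on these fixed 21 roles.

-- ===== PORT A =====
-- ROLE_SKILLS: module-level dict constant, as an association list in insertion order.
def ROLE_SKILLS : List (String × List String) := [
  ("Java Backend Developer", ["Java", "Spring Boot", "REST API", "Hibernate", "JPA",
    "MySQL", "PostgreSQL", "Docker", "Maven"]),
  ("Node.js Backend Developer", ["JavaScript", "Node.js", "Express.js", "REST API", "MongoDB",
    "JWT Authentication", "Docker", "Redis"]),
  ("Full Stack Developer (Java)", ["HTML", "CSS", "JavaScript", "React", "Java",
    "Spring Boot", "REST API", "MySQL", "Docker"]),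
  ("Full Stack Developer (JS)", ["HTML", "CSS", "JavaScript", "React", "Node.js",
    "Express.js", "MongoDB", "Docker"]),
  ("Frontend Developer", ["HTML", "CSS", "JavaScript", "React", "Vue.js",
    "Tailwind CSS", "Responsive Design"]),
  ("Mobile Developer", ["Flutter", "Dart", "React Native", "Kotlin", "Swift",
    "Firebase", "UI/UX"]),
  ("Data Scientist", ["Python", "Pandas", "NumPy", "Scikit-learn",
    "Matplotlib", "TensorFlow", "SQL"]),
  ("AI Engineer", ["Python", "TensorFlow", "PyTorch", "Deep Learning",
    "NLP", "ML Models", "MLOps"]),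
  ("Blockchain Developer", ["Solidity", "Ethereum", "Smart Contracts",
    "Web3.js", "Cryptography"]),
  ("Cloud Engineer", ["AWS", "Azure", "GCP", "Docker", "Kubernetes",
    "Terraform", "CI/CD"]),
  ("DevOps Engineer", ["Docker", "Kubernetes", "CI/CD", "Linux",
    "AWS", "Monitoring", "GitHub Actions"]),
  ("UI/UX Designer", ["Figma", "Adobe XD", "Sketch", "Wireframing",
    "Prototyping", "User Research", "Information Architecture",
    "Usability Testing", "Accessibility", "Design Systems",
    "HTML", "CSS", "Basic JavaScript"]),
  ("Web Developer", ["HTML", "CSS", "JavaScript", "Responsive Design", "Basic SEO",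
    "Version Control (Git)", "Basic Backend (PHP/Node.js/Python)"]),
  ("Backend Developer", ["REST API", "Databases (SQL & NoSQL)", "Authentication",
    "Docker", "Server-side Framework (Spring/Express/Django)"]),
  ("Database Administrator", ["SQL", "MySQL", "PostgreSQL", "Database Backup",
    "Performance Tuning", "Stored Procedures", "Security"]),
  ("Machine Learning Engineer", ["Python", "Scikit-learn", "TensorFlow", "PyTorch",
    "Model Optimization", "Data Preprocessing", "ML Pipelines"]),
  ("System Administrator", ["Linux", "Shell Scripting", "Networking Basics",
    "System Monitoring", "Backup & Recovery", "Firewall Config"]),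
  ("Embedded Systems Engineer", ["C/C++", "Microcontrollers (Arduino, STM32)",
    "RTOS", "IoT Protocols", "Low-level Hardware Debugging"]),
  ("AR/VR Developer", ["Unity", "C#", "Unreal Engine", "3D Modeling",
    "ARKit/ARCore", "OpenXR", "Interaction Design"]),
  ("Cybersecurity Specialist", ["Network Security", "Penetration Testing", "SIEM",
    "Firewalls", "Cryptography", "Incident Response"]),
  ("Network Engineer", ["Routing & Switching", "TCP/IP", "LAN/WAN",
    "Cisco Devices", "Firewall Management", "Network Monitoring"])]

-- matches = len(set(map(str.lower, user_skills)) & set(map(str.lower, skills)))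
def aMatches (user_skills : List String) (skills : List String) : Int :=
  PySem.Set.len (PySem.Set.inter
    (PySem.Set.ofList (user_skills.map PySem.Str.lower))
    (PySem.Set.ofList (skills.map PySem.Str.lower)))

def match_best_role (user_skills : List String) : Option String :=
  (ROLE_SKILLS.foldl
    (fun (st : Option String × Int) p =>
      let m := aMatches user_skills p.2
      if m > st.2 then (some p.1, m) else st)
    (none, 0)).1

-- ===== PORT B =====
-- Source B module constants: ROLES (role names in order) and SKILL_ROLES, the
-- precomputed inverted index (lowercased skill -> roles listing it).
def ROLES : List String := ["Java Backend Developer",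
  "Node.js Backend Developer",
  "Full Stack Developer (Java)",
  "Full Stack Developer (JS)",
  "Frontend Developer",
  "Mobile Developer",
  "Data Scientist",
  "AI Engineer",
  "Blockchain Developer",
  "Cloud Engineer",
  "DevOps Engineer",
  "UI/UX Designer",
  "Web Developer",
  "Backend Developer",
  "Database Administrator",
  "Machine Learning Engineer",
  "System Administrator",
  "Embedded Systems Engineer",
  "AR/VR Developer",
  "Cybersecurity Specialist",
  "Network Engineer"]

def SKILL_ROLES : PySem.Dict String (List String) := PySem.Dict.mk [
  ("java", ["Java Backend Developer", "Full Stack Developer (Java)"]),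
  ("spring boot", ["Java Backend Developer", "Full Stack Developer (Java)"]),
  ("rest api", ["Java Backend Developer", "Node.js Backend Developer", "Full Stack Developer (Java)", "Backend Developer"]),
  ("hibernate", ["Java Backend Developer"]),
  ("jpa", ["Java Backend Developer"]),
  ("mysql", ["Java Backend Developer", "Full Stack Developer (Java)", "Database Administrator"]),
  ("postgresql", ["Java Backend Developer", "Database Administrator"]),
  ("docker", ["Java Backend Developer", "Node.js Backend Developer", "Full Stack Developer (Java)", "Full Stack Developer (JS)", "Cloud Engineer", "DevOps Engineer", "Backend Developer"]),
  ("maven", ["Java Backend Developer"]),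
  ("javascript", ["Node.js Backend Developer", "Full Stack Developer (Java)", "Full Stack Developer (JS)", "Frontend Developer", "Web Developer"]),
  ("node.js", ["Node.js Backend Developer", "Full Stack Developer (JS)"]),
  ("express.js", ["Node.js Backend Developer", "Full Stack Developer (JS)"]),
  ("mongodb", ["Node.js Backend Developer", "Full Stack Developer (JS)"]),
  ("jwt authentication", ["Node.js Backend Developer"]),
  ("redis", ["Node.js Backend Developer"]),
  ("html", ["Full Stack Developer (Java)", "Full Stack Developer (JS)", "Frontend Developer", "UI/UX Designer", "Web Developer"]),
  ("css", ["Full Stack Developer (Java)", "Full Stack Developer (JS)", "Frontend Developer", "UI/UX Designer", "Web Developer"]),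
  ("react", ["Full Stack Developer (Java)", "Full Stack Developer (JS)", "Frontend Developer"]),
  ("vue.js", ["Frontend Developer"]),
  ("tailwind css", ["Frontend Developer"]),
  ("responsive design", ["Frontend Developer", "Web Developer"]),
  ("flutter", ["Mobile Developer"]),
  ("dart", ["Mobile Developer"]),
  ("react native", ["Mobile Developer"]),
  ("kotlin", ["Mobile Developer"]),
  ("swift", ["Mobile Developer"]),
  ("firebase", ["Mobile Developer"]),
  ("ui/ux", ["Mobile Developer"]),
  ("python", ["Data Scientist", "AI Engineer", "Machine Learning Engineer"]),
  ("pandas", ["Data Scientist"]),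
  ("numpy", ["Data Scientist"]),
  ("scikit-learn", ["Data Scientist", "Machine Learning Engineer"]),
  ("matplotlib", ["Data Scientist"]),
  ("tensorflow", ["Data Scientist", "AI Engineer", "Machine Learning Engineer"]),
  ("sql", ["Data Scientist", "Database Administrator"]),
  ("pytorch", ["AI Engineer", "Machine Learning Engineer"]),
  ("deep learning", ["AI Engineer"]),
  ("nlp", ["AI Engineer"]),
  ("ml models", ["AI Engineer"]),
  ("mlops", ["AI Engineer"]),
  ("solidity", ["Blockchain Developer"]),
  ("ethereum", ["Blockchain Developer"]),
  ("smart contracts", ["Blockchain Developer"]),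
  ("web3.js", ["Blockchain Developer"]),
  ("cryptography", ["Blockchain Developer", "Cybersecurity Specialist"]),
  ("aws", ["Cloud Engineer", "DevOps Engineer"]),
  ("azure", ["Cloud Engineer"]),
  ("gcp", ["Cloud Engineer"]),
  ("kubernetes", ["Cloud Engineer", "DevOps Engineer"]),
  ("terraform", ["Cloud Engineer"]),
  ("ci/cd", ["Cloud Engineer", "DevOps Engineer"]),
  ("linux", ["DevOps Engineer", "System Administrator"]),
  ("monitoring", ["DevOps Engineer"]),
  ("github actions", ["DevOps Engineer"]),
  ("figma", ["UI/UX Designer"]),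
  ("adobe xd", ["UI/UX Designer"]),
  ("sketch", ["UI/UX Designer"]),
  ("wireframing", ["UI/UX Designer"]),
  ("prototyping", ["UI/UX Designer"]),
  ("user research", ["UI/UX Designer"]),
  ("information architecture", ["UI/UX Designer"]),
  ("usability testing", ["UI/UX Designer"]),
  ("accessibility", ["UI/UX Designer"]),
  ("design systems", ["UI/UX Designer"]),
  ("basic javascript", ["UI/UX Designer"]),
  ("basic seo", ["Web Developer"]),
  ("version control (git)", ["Web Developer"]),
  ("basic backend (php/node.js/python)", ["Web Developer"]),
  ("databases (sql & nosql)", ["Backend Developer"]),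
  ("authentication", ["Backend Developer"]),
  ("server-side framework (spring/express/django)", ["Backend Developer"]),
  ("database backup", ["Database Administrator"]),
  ("performance tuning", ["Database Administrator"]),
  ("stored procedures", ["Database Administrator"]),
  ("security", ["Database Administrator"]),
  ("model optimization", ["Machine Learning Engineer"]),
  ("data preprocessing", ["Machine Learning Engineer"]),
  ("ml pipelines", ["Machine Learning Engineer"]),
  ("shell scripting", ["System Administrator"]),
  ("networking basics", ["System Administrator"]),
  ("system monitoring", ["System Administrator"]),
  ("backup & recovery", ["System Administrator"]),
  ("firewall config", ["System Administrator"]),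
  ("c/c++", ["Embedded Systems Engineer"]),
  ("microcontrollers (arduino, stm32)", ["Embedded Systems Engineer"]),
  ("rtos", ["Embedded Systems Engineer"]),
  ("iot protocols", ["Embedded Systems Engineer"]),
  ("low-level hardware debugging", ["Embedded Systems Engineer"]),
  ("unity", ["AR/VR Developer"]),
  ("c#", ["AR/VR Developer"]),
  ("unreal engine", ["AR/VR Developer"]),
  ("3d modeling", ["AR/VR Developer"]),
  ("arkit/arcore", ["AR/VR Developer"]),
  ("openxr", ["AR/VR Developer"]),
  ("interaction design", ["AR/VR Developer"]),
  ("network security", ["Cybersecurity Specialist"]),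
  ("penetration testing", ["Cybersecurity Specialist"]),
  ("siem", ["Cybersecurity Specialist"]),
  ("firewalls", ["Cybersecurity Specialist"]),
  ("incident response", ["Cybersecurity Specialist"]),
  ("routing & switching", ["Network Engineer"]),
  ("tcp/ip", ["Network Engineer"]),
  ("lan/wan", ["Network Engineer"]),
  ("cisco devices", ["Network Engineer"]),
  ("firewall management", ["Network Engineer"]),
  ("network monitoring", ["Network Engineer"])]

-- counts[role] = counts.get(role, 0) + 1 over the distinct lowercased user skills
def altCounts (user_skills : List String) : PySem.Dict String Int :=
  (PySem.Set.ofList (user_skills.map PySem.Str.lower)).foldl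
    (fun c s => (SKILL_ROLES.getD s []).foldl (fun c r => c.modify r 0 (fun x => x + 1)) c)
    PySem.Dict.empty

-- best = max(counts over ROLES, default 0); return first role attaining it, None if 0
def match_best_role_alt (user_skills : List String) : Option String :=
  let counts := altCounts user_skills
  let best := ROLES.foldl (fun a r => max a (counts.getD r 0)) 0
  if best = 0 then none
  else ROLES.find? (fun r => counts.getD r 0 == best)

-- ===== PRECONDITION & SPEC =====
def Spec_match_best_role (user_skills : List String) (out : Option String) : Prop := out = match_best_role_alt user_skills
instance (user_skills : List String) (out : Option String) : Decidable (Spec_match_best_role user_skills out) := by unfold Spec_match_best_role; infer_instance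

-- ===== CLAIM (what is proved, stated in full; the proofs are below) =====
def Claim_equal_match_best_role : Prop := ∀ (user_skills : List String), Dom_match_best_role user_skills → Spec_match_best_role user_skills (match_best_role user_skills)

-- ===== LEMMAS AND PROOFS =====

-- proof-only reconstruction of the inverted index from ROLE_SKILLS
def mbrPairs : List (String × String) :=
  ROLE_SKILLS.flatMap (fun p => p.2.map (fun s => (PySem.Str.lower s, p.1)))

def mbrIndex : PySem.Dict String (List String) :=
  mbrPairs.foldl (fun d q => d.modify q.1 [] (fun x => x ++ [q.2])) PySem.Dict.empty

-- the hard-coded SKILL_ROLES is exactly the inverted index of ROLE_SKILLS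
set_option maxRecDepth 40000 in
theorem skill_roles_eq : SKILL_ROLES = mbrIndex := by decide

theorem roles_eq : ROLES = ROLE_SKILLS.map Prod.fst := by decide

-- role names are pairwise distinct
theorem mbr_keys_nodup : (ROLE_SKILLS.map Prod.fst).Nodup := by decide

-- each role's lowercased skill list has no duplicates
theorem mbr_low_nodup : ∀ p ∈ ROLE_SKILLS, (p.2.map PySem.Str.lower).Nodup := by decide

theorem mbr_pairCount (sk : List String) (r' s r : String) :
    List.countP (fun q => q == (s, r)) (sk.map (fun t => (PySem.Str.lower t, r'))) =
    if r' = r then (sk.map PySem.Str.lower).count s else 0 := by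
  rw [List.countP_map]
  by_cases h : r' = r
  · subst h
    simp only [List.count, List.countP_map]
    refine List.countP_congr ?_
    intro t _
    simp
  · simp [Function.comp, h]

theorem mbr_flat_count_zero (l : List (String × List String)) (s r : String)
    (h : r ∉ l.map Prod.fst) :
    List.countP (fun q => q == (s, r))
      (l.flatMap (fun p => p.2.map (fun t => (PySem.Str.lower t, p.1)))) = 0 := by
  rw [List.countP_flatMap]
  apply List.sum_eq_zero
  intro x hx
  obtain ⟨p, hp, rfl⟩ := List.mem_map.1 hx
  have hne : p.1 ≠ r := fun e => h (e ▸ List.mem_map_of_mem hp)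
  simp [Function.comp, hne]

theorem mbr_flat_count (l : List (String × List String)) (r : String) (sk : List String)
    (s : String) (hnd : (l.map Prod.fst).Nodup) (hmem : (r, sk) ∈ l) :
    List.countP (fun q => q == (s, r))
      (l.flatMap (fun p => p.2.map (fun t => (PySem.Str.lower t, p.1)))) =
    (sk.map PySem.Str.lower).count s := by
  induction l with
  | nil => cases hmem
  | cons p l ih =>
    obtain ⟨r0, sk0⟩ := p
    rw [List.flatMap_cons, List.countP_append, mbr_pairCount]
    rw [List.map_cons, List.nodup_cons] at hnd
    rcases List.mem_cons.1 hmem with he | ht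
    · injection he with e1 e2
      subst e1; subst e2
      rw [if_pos rfl, mbr_flat_count_zero l s r hnd.1]
      simp
    · have hmm : r ∈ List.map Prod.fst l := List.mem_map_of_mem ht
      have hr : r0 ≠ r := fun e => hnd.1 (by rw [e]; exact hmm)
      rw [if_neg hr]
      simpa using ih hnd.2 ht

theorem mbr_index_getD (s : String) :
    mbrIndex.getD s [] = (mbrPairs.filter (fun q => q.1 == s)).map (fun q => q.2) := by
  unfold mbrIndex
  rw [PySem.Dict.getD_foldl_modify_append]
  have hz : (PySem.Dict.empty : PySem.Dict String (List String)).getD s [] = [] := rfl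
  rw [hz, List.nil_append]

theorem mbr_index_count (s r : String) (sk : List String) (h : (r, sk) ∈ ROLE_SKILLS) :
    (mbrIndex.getD s []).count r = (sk.map PySem.Str.lower).count s := by
  rw [mbr_index_getD]
  unfold mbrPairs
  rw [← mbr_flat_count ROLE_SKILLS r sk s mbr_keys_nodup h]
  rw [List.count, List.countP_map, List.countP_filter]
  refine List.countP_congr ?_
  intro q _
  obtain ⟨a, b⟩ := q
  simp [Function.comp]
  tauto

theorem mbr_counts_spec (l : List String) (c0 : PySem.Dict String Int) (r : String) :
    (l.foldl (fun c s => (mbrIndex.getD s []).foldl (fun c r' => c.modify r' 0 (fun x => x + 1)) c) c0).getD r 0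
    = c0.getD r 0 + (l.map (fun s => ((mbrIndex.getD s []).count r : Int))).sum := by
  induction l generalizing c0 with
  | nil => simp only [List.foldl_nil, List.map_nil, List.sum_nil, add_zero]
  | cons x l ih =>
    simp only [List.foldl_cons, List.map_cons, List.sum_cons]
    rw [ih, PySem.Dict.getD_foldl_modify_add_one]
    ring

theorem mbr_per_role (us : List String) (p : String × List String) (hp : p ∈ ROLE_SKILLS) :
    (altCounts us).getD p.1 0 = aMatches us p.2 := by
  obtain ⟨r, sk⟩ := p
  have hnd : (sk.map PySem.Str.lower).Nodup := mbr_low_nodup (r, sk) hp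
  unfold altCounts aMatches
  rw [skill_roles_eq, mbr_counts_spec]
  have hz : (PySem.Dict.empty : PySem.Dict String Int).getD r 0 = 0 := rfl
  rw [hz, zero_add]
  have hfun : (fun s => ((mbrIndex.getD s []).count r : Int)) =
      (fun s => if (PySem.Set.ofList (sk.map PySem.Str.lower)).contains s = true then (1 : Int) else 0) := by
    funext s
    rw [mbr_index_count s r sk hp, hnd.count]
    by_cases hm : s ∈ sk.map PySem.Str.lower
    · rw [if_pos hm, if_pos (by rw [PySem.Set.contains_iff, PySem.Set.mem_ofList]; exact hm)]
      rfl
    · rw [if_neg hm, if_neg (by rw [PySem.Set.contains_iff, PySem.Set.mem_ofList]; exact hm)]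
      rfl
  rw [hfun, PySem.List.sum_map_ite_one_zero]
  show _ = PySem.Set.len (PySem.Set.inter _ _)
  simp only [PySem.Set.len, PySem.Set.inter, List.countP_eq_length_filter]

-- running maximum of the second components
def mbrMax (l : List (String × Int)) (v : Int) : Int := l.foldl (fun a p => max a p.2) v

theorem mbrMax_le (l : List (String × Int)) (v : Int) : v ≤ mbrMax l v := by
  induction l generalizing v with
  | nil => exact le_refl v
  | cons a l ih => exact le_trans (le_max_left v a.2) (ih (max v a.2))

-- A's strict-improvement argmax returns the first pair attaining the running maximum
theorem argmax_fold (l : List (String × Int)) (b : Option String) (v : Int) :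
    (l.foldl (fun (st : Option String × Int) p => if p.2 > st.2 then (some p.1, p.2) else st) (b, v)).1
    = if mbrMax l v > v
      then (l.find? (fun p => p.2 == mbrMax l v)).map Prod.fst
      else b := by
  induction l generalizing b v with
  | nil => simp [mbrMax]
  | cons a l ih =>
    have hM : mbrMax (a :: l) v = mbrMax l (max v a.2) := rfl
    by_cases h : a.2 > v
    · have hmv : max v a.2 = a.2 := max_eq_right (le_of_lt h)
      rw [List.foldl_cons, if_pos h, ih, hM, hmv]
      by_cases h2 : mbrMax l a.2 > a.2
      · have hne : (a.2 == mbrMax l a.2) = false := by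
          simp only [beq_eq_false_iff_ne]; exact ne_of_lt h2
        rw [if_pos h2, if_pos (lt_trans h h2), List.find?_cons, hne]
      · have he : mbrMax l a.2 = a.2 := le_antisymm (not_lt.1 h2) (mbrMax_le l a.2)
        rw [if_neg h2, he, if_pos h, List.find?_cons]
        simp
    · have hmv : max v a.2 = v := max_eq_left (not_lt.1 h)
      rw [List.foldl_cons, if_neg h, ih, hM, hmv]
      by_cases h2 : mbrMax l v > v
      · have hne : (a.2 == mbrMax l v) = false := by
          simp only [beq_eq_false_iff_ne]
          exact ne_of_lt (lt_of_le_of_lt (not_lt.1 h) h2)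
        rw [if_pos h2, if_pos h2, List.find?_cons, hne]
      · rw [if_neg h2, if_neg h2]

-- find? only looks at members, so congruent predicates give the same result
theorem find?_congr_mem {α : Type} (l : List α) (p q : α → Bool)
    (h : ∀ x ∈ l, p x = q x) : l.find? p = l.find? q := by
  induction l with
  | nil => rfl
  | cons a l ih =>
    rw [List.find?_cons, List.find?_cons, h a (List.mem_cons_self ..)]
    split
    · rfl
    · exact ih (fun x hx => h x (List.mem_cons_of_mem a hx))

-- ===== VERDICT (by name: the statement is the Claim_ definition above) =====
set_option maxHeartbeats 1000000 in
theorem match_best_role_spec : Claim_equal_match_best_role := by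
  intro us _
  unfold Spec_match_best_role match_best_role match_best_role_alt
  set counts := altCounts us with hc
  -- both sides over the common value list l
  set l : List (String × Int) := ROLE_SKILLS.map (fun p => (p.1, aMatches us p.2)) with hl
  have hA : (ROLE_SKILLS.foldl
      (fun (st : Option String × Int) p =>
        let m := aMatches us p.2
        if m > st.2 then (some p.1, m) else st) (none, 0)).1
      = (l.foldl (fun (st : Option String × Int) p => if p.2 > st.2 then (some p.1, p.2) else st) (none, 0)).1 := by
    rw [hl, List.foldl_map]
  have hbest : ROLES.foldl (fun a r => max a (counts.getD r 0)) 0 = mbrMax l 0 := by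
    rw [roles_eq, List.foldl_map, hl]
    unfold mbrMax
    rw [List.foldl_map]
    exact PySem.List.foldl_congr_mem' ROLE_SKILLS _ _ 0
      (fun p hp acc => by rw [hc, mbr_per_role us p hp])
  have hfind : ROLES.find? (fun r => counts.getD r 0 == mbrMax l 0)
      = (l.find? (fun p => p.2 == mbrMax l 0)).map Prod.fst := by
    rw [roles_eq, hl, List.find?_map, List.find?_map, Option.map_map]
    have hco : (Prod.fst ∘ fun p : String × List String => (p.1, aMatches us p.2))
        = (Prod.fst : String × List String → String) := rfl
    rw [hco]
    refine congrArg (Option.map Prod.fst) (find?_congr_mem ROLE_SKILLS _ _ ?_)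
    intro p hp
    simp only [Function.comp]
    rw [hc, mbr_per_role us p hp]
  rw [hA, argmax_fold]
  simp only [hbest, hfind]
  have h0 : (0 : Int) ≤ mbrMax l 0 := mbrMax_le l 0
  by_cases hz : mbrMax l 0 = 0
  · rw [if_neg (by omega), if_pos hz]
  · rw [if_pos (by omega), if_neg hz]
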